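-- pv_equiv track=rewrite | github.com/lealeaaron/recu-1er-parcial- | 1er parcial/funciones.py | mejor_rating
-- ===== SOURCE A (Python) =====
-- def mejor_rating(lista, dato):
--     rating_maximo = 0
--     pelicula = None
--     rating = True
--     for i in lista:
--         if rating or i[dato] > rating_maximo:
--             rating_maximo = i[dato]
--             pelicula = i
--             rating = False
--     return pelicula
-- ===== SOURCE B (Python) =====
-- def mejor_rating(lista, dato):
--     if not lista:
--         return None
--     return sorted(lista, key=lambda i: i[dato], reverse=True)[0]
-- ===== Notes on version B (the rewrite author's own statement) =====
-- stated objective: alternative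
-- what changed: Replaces A's manual scan with flag/accumulator state by a stable descending sort on the rating key followed by taking the first element (stability with reverse=True preserves A's first-among-ties winner); empty list short-circuits to None.
import Mathlib
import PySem

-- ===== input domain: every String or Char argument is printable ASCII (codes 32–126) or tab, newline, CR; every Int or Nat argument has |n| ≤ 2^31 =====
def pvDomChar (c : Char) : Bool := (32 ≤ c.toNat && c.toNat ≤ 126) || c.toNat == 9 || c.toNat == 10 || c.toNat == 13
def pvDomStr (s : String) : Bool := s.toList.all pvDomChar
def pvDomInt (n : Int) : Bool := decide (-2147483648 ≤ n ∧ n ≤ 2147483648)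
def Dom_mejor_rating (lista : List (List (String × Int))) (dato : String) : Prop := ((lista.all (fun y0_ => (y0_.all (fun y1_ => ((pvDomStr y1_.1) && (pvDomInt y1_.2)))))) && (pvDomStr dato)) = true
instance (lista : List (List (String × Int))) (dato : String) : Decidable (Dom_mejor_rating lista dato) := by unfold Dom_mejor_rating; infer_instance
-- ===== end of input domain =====

-- B replaces A's manual flag-and-accumulator scan by a stable descending sort on the
-- rating key and takes its first element (same value; an alternative decomposition, not faster).

-- i[dato] — Python dict lookup, exact; default 0 is never used inside Pre_ (lookup always succeeds there)
def pvKey (dato : String) (i : List (String × Int)) : Int :=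
  (PySem.Dict.get? (PySem.Dict.mk i) dato).getD 0

-- ===== PORT A =====
-- literal transliteration of A's loop: state = (rating_maximo, pelicula, rating)
def mejor_rating (lista : List (List (String × Int))) (dato : String) : Option (List (String × Int)) :=
  let s := lista.foldl
    (fun (s : Int × Option (List (String × Int)) × Bool) i =>
      if s.2.2 || decide (pvKey dato i > s.1) then
        (pvKey dato i, some i, false)
      else s)
    (0, none, true)
  s.2.1

-- ===== PORT B =====
-- literal transliteration of Source B: empty → None, else sorted(lista, key=lambda i: i[dato], reverse=True)[0]
def mejor_rating_alt (lista : List (List (String × Int))) (dato : String) : Option (List (String × Int)) :=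
  if lista = [] then none
  else (PySem.List.sorted lista (pvKey dato) true).head?

-- ===== PRECONDITION & SPEC =====
-- Pre_ excludes exactly the inputs where Python raises KeyError (some element lacks key dato);
-- both A and B raise there.
def Pre_mejor_rating (lista : List (List (String × Int))) (dato : String) : Prop :=
  ∀ i ∈ lista, (PySem.Dict.get? (PySem.Dict.mk i) dato).isSome = true
instance (lista : List (List (String × Int))) (dato : String) : Decidable (Pre_mejor_rating lista dato) := by unfold Pre_mejor_rating; infer_instance

def pvWitness_mejor_rating : (List (List (String × Int))) × String :=
  ([[("r", 3)], [("r", 5), ("x", 1)], [("r", 5)]], "r")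

def Spec_mejor_rating (lista : List (List (String × Int))) (dato : String) (out : Option (List (String × Int))) : Prop := out = mejor_rating_alt lista dato
instance (lista : List (List (String × Int))) (dato : String) (out : Option (List (String × Int))) : Decidable (Spec_mejor_rating lista dato out) := by unfold Spec_mejor_rating; infer_instance

-- ===== CLAIM (what is proved, stated in full; the proofs are below) =====
def Claim_equal_mejor_rating : Prop := ∀ (lista : List (List (String × Int))) (dato : String), Dom_mejor_rating lista dato → Pre_mejor_rating lista dato → Spec_mejor_rating lista dato (mejor_rating lista dato)

-- ===== LEMMAS AND PROOFS =====

-- head of B's insertion-sort accumulator is exactly the strict-greater running maximum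
theorem head_foldl_insertBy {α : Type} (key : α → Int) :
    ∀ (xs : List α) (m : α) (t : List α),
      (xs.foldl (fun acc x => PySem.List.insertBy (fun a b => decide (key b < key a)) x acc) (m :: t)).head? =
        some (xs.foldl (fun m x => if key m < key x then x else m) m) := by
  intro xs
  induction xs with
  | nil => intro m t; rfl
  | cons x xs ih =>
    intro m t
    simp only [List.foldl_cons, PySem.List.insertBy]
    by_cases h : key m < key x
    · simp [h, ih]
    · simp [h, ih]

-- A's loop after the first element: the state stays (key m, some m, false), m the running first max
theorem stepA_inv (dato : String) :
    ∀ (xs : List (List (String × Int))) (m : List (String × Int)),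
      xs.foldl
        (fun (s : Int × Option (List (String × Int)) × Bool) i =>
          if s.2.2 || decide (pvKey dato i > s.1) then
            (pvKey dato i, some i, false)
          else s)
        (pvKey dato m, some m, false)
      = (pvKey dato (xs.foldl (fun m i => if pvKey dato m < pvKey dato i then i else m) m),
         some (xs.foldl (fun m i => if pvKey dato m < pvKey dato i then i else m) m), false) := by
  intro xs
  induction xs with
  | nil => intro m; rfl
  | cons x xs ih =>
    intro m
    simp only [List.foldl_cons]
    by_cases h : pvKey dato m < pvKey dato x
    · have hx : ((false : Bool) || decide (pvKey dato x > pvKey dato m)) = true := by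
        simpa using h
      rw [if_pos hx, if_pos h]
      exact ih x
    · have hx : ¬ (((false : Bool) || decide (pvKey dato x > pvKey dato m)) = true) := by
        simpa using h
      rw [if_neg hx, if_neg h]
      exact ih m

-- ===== VERDICT (by name: the statement is the Claim_ definition above) =====
theorem mejor_rating_spec : Claim_equal_mejor_rating := by
  intro lista dato _ _
  unfold Spec_mejor_rating mejor_rating mejor_rating_alt
  cases lista with
  | nil => rfl
  | cons x xs =>
    simp only [List.foldl_cons, PySem.List.sorted_rev_eq_foldl_insertBy]
    have h1 : ((if (true : Bool) || decide (pvKey dato x > (0 : Int)) then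
        (pvKey dato x, some x, false)
      else ((0 : Int), (none : Option (List (String × Int))), true)))
        = (pvKey dato x, some x, false) := by simp
    rw [h1, stepA_inv]
    have h0 : PySem.List.insertBy
        (fun a b => decide (pvKey dato b < pvKey dato a)) x
        ([] : List (List (String × Int))) = [x] := rfl
    simp only [h0]
    rw [head_foldl_insertBy (pvKey dato) xs x []]
    simp
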